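-- pv_equiv track=rewrite | github.com/Dibyajyoti-Pradhan/Coding | Python Playground/06_sliding_window.py | num_of_subarrays
-- ===== SOURCE A (Python) =====
-- from typing import List, Dict
--
-- def num_of_subarrays(arr: List[int], k: int, threshold: int) -> int:
--     """
--     LeetCode 1343 - Number of subarrays of size k with average >= threshold.
--
--     Time: O(n), Space: O(1)
--     """
--     count = 0
--     target_sum = k * threshold
--
--     window_sum = sum(arr[:k])
--     if window_sum >= target_sum:
--         count += 1
--
--     for i in range(k, len(arr)):
--         window_sum = window_sum - arr[i - k] + arr[i]
--         if window_sum >= target_sum: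
--             count += 1
--
--     return count
-- ===== SOURCE B (Python) =====
-- def num_of_subarrays(arr, k, threshold):
--     prefix = [0]
--     for x in arr:
--         prefix.append(prefix[-1] + x)
--     target = k * threshold
--     count = 0
--     for i in range(len(arr) - k + 1):
--         if prefix[i + k] - prefix[i] >= target:
--             count += 1
--     return count
-- ===== Notes on version B (the rewrite author's own statement) =====
-- stated objective: alternative
-- what changed: Replaces A's rolling-window running sum with a prefix-sum array built in one pass and a separate pass counting starts i with P[i+k]-P[i] >= k*threshold.
-- intended difference: When len(arr) < k (and k > 0) with sum(arr) >= k*threshold, A counts the truncated whole array as one size-k window and returns 1, while B returns 0, the intended count since no subarray of size k exists. — e.g. on num_of_subarrays([5], 3, 1): A returns 1, B returns 0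
import Mathlib
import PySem

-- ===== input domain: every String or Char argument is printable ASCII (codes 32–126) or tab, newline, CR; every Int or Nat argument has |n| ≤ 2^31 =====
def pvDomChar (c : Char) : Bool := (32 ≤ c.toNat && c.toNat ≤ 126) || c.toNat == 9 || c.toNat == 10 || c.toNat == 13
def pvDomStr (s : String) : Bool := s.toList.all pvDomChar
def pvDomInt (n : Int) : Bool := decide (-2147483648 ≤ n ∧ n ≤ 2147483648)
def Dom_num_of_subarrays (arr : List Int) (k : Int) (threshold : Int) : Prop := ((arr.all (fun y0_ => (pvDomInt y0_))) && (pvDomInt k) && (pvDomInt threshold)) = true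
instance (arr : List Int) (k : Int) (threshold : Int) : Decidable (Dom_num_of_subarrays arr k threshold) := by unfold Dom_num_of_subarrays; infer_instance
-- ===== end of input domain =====

-- B replaces A's rolling-window update with a prefix-sum array and a separate counting pass; same O(n) cost, different decomposition.

-- ===== PORT A =====
def num_of_subarrays (arr : List Int) (k : Int) (threshold : Int) : Int :=
  let target : Int := k * threshold
  let windowSum : Int := (PySem.List.slice arr none (some k)).sum
  let count : Int := if windowSum ≥ target then 1 else 0
  let st := (PySem.List.pyRange k (arr.length : Int)).foldl
    (fun (st : Int × Int) i =>
      let ws := st.1 - PySem.List.pyGetD arr (i - k) 0 + PySem.List.pyGetD arr i 0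
      (ws, if ws ≥ target then st.2 + 1 else st.2))
    (windowSum, count)
  st.2

-- ===== PORT B =====
-- B-side helper: the prefix-sum list built exactly as Source B builds it (prefix[-1] is a Python -1 index)
def pvPrefix (arr : List Int) : List Int :=
  arr.foldl (fun p x => p ++ [PySem.List.pyGetD p (-1) 0 + x]) [0]

def num_of_subarrays_alt (arr : List Int) (k : Int) (threshold : Int) : Int :=
  let pre := pvPrefix arr
  let target : Int := k * threshold
  (PySem.List.pyRange 0 ((arr.length : Int) - k + 1)).foldl
    (fun c i =>
      if PySem.List.pyGetD pre (i + k) 0 - PySem.List.pyGetD pre i 0 ≥ target then c + 1 else c)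
    0

-- ===== PRECONDITION & SPEC =====
-- Pre_ excludes k < 0, on which A always raises IndexError (the rolling loop indexes past the end).
def Pre_num_of_subarrays (arr : List Int) (k : Int) (threshold : Int) : Prop := 0 ≤ k
instance (arr : List Int) (k : Int) (threshold : Int) : Decidable (Pre_num_of_subarrays arr k threshold) := by unfold Pre_num_of_subarrays; infer_instance
def pvWitness_num_of_subarrays : List Int × Int × Int := ([1, 2, 3, 4], 2, 1)

-- When len(arr) < k and sum(arr) >= k*threshold, A counts the truncated whole array as one size-k window and returns 1,
-- while B returns 0, the intended count since no subarray of size k exists.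
def D_num_of_subarrays (arr : List Int) (k : Int) (threshold : Int) : Prop :=
  0 < k ∧ (arr.length : Int) < k ∧ arr.sum ≥ k * threshold
instance (arr : List Int) (k : Int) (threshold : Int) : Decidable (D_num_of_subarrays arr k threshold) := by unfold D_num_of_subarrays; infer_instance

def Spec_num_of_subarrays (arr : List Int) (k : Int) (threshold : Int) (out : Int) : Prop := ¬ D_num_of_subarrays arr k threshold → out = num_of_subarrays_alt arr k threshold
instance (arr : List Int) (k : Int) (threshold : Int) (out : Int) : Decidable (Spec_num_of_subarrays arr k threshold out) := by unfold Spec_num_of_subarrays; infer_instance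

def pvDiffWitness_num_of_subarrays : List Int × Int × Int := ([5], 3, 1)
def pvDiffWitnessOut_num_of_subarrays : Int × Int := (1, 0)

-- ===== CLAIM (what is proved, stated in full; the proofs are below) =====
def Claim_unchanged_num_of_subarrays : Prop := ∀ (arr : List Int) (k : Int) (threshold : Int), Dom_num_of_subarrays arr k threshold → Pre_num_of_subarrays arr k threshold → Spec_num_of_subarrays arr k threshold (num_of_subarrays arr k threshold)
def Claim_changed_num_of_subarrays : Prop := Dom_num_of_subarrays (pvDiffWitness_num_of_subarrays.1) (pvDiffWitness_num_of_subarrays.2.1) (pvDiffWitness_num_of_subarrays.2.2) ∧ Pre_num_of_subarrays (pvDiffWitness_num_of_subarrays.1) (pvDiffWitness_num_of_subarrays.2.1) (pvDiffWitness_num_of_subarrays.2.2) ∧ D_num_of_subarrays (pvDiffWitness_num_of_subarrays.1) (pvDiffWitness_num_of_subarrays.2.1) (pvDiffWitness_num_of_subarrays.2.2) ∧ num_of_subarrays (pvDiffWitness_num_of_subarrays.1) (pvDiffWitness_num_of_subarrays.2.1) (pvDiffWitness_num_of_subarrays.2.2) = pvDiffWitnessOut_num_of_subarrays.1 ∧ num_of_subarrays_alt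 (pvDiffWitness_num_of_subarrays.1) (pvDiffWitness_num_of_subarrays.2.1) (pvDiffWitness_num_of_subarrays.2.2) = pvDiffWitnessOut_num_of_subarrays.2 ∧ pvDiffWitnessOut_num_of_subarrays.1 ≠ pvDiffWitnessOut_num_of_subarrays.2
def Claim_exact_num_of_subarrays : Prop := ∀ (arr : List Int) (k : Int) (threshold : Int), Dom_num_of_subarrays arr k threshold → Pre_num_of_subarrays arr k threshold → D_num_of_subarrays arr k threshold → num_of_subarrays arr k threshold ≠ num_of_subarrays_alt arr k threshold

-- ===== LEMMAS AND PROOFS =====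

-- prefix sums of arr: pvS arr j = sum of the first j elements (take clamps past the end)
def pvS (arr : List Int) (j : Nat) : Int := (arr.take j).sum

-- the window predicate both programs count: the size-kn window starting at i has sum ≥ target
def pvWin (arr : List Int) (kn : Nat) (target : Int) (i : Nat) : Bool :=
  decide (pvS arr (i + kn) - pvS arr i ≥ target)

lemma pvS_succ (arr : List Int) (j : Nat) (h : j < arr.length) :
    pvS arr (j + 1) = pvS arr j + arr.getD j 0 := by
  unfold pvS; rw [List.getD_eq_getElem _ _ h]; exact List.sum_take_succ arr j h

lemma pyGetD_neg_one (p : List Int) (c : Int) (h : p.getLast? = some c) :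
    PySem.List.pyGetD p (-1) 0 = c := by
  have hne : p ≠ [] := by rintro rfl; simp at h
  have hl : 0 < p.length := List.length_pos_iff.mpr hne
  simp only [PySem.List.pyGetD, PySem.List.pyGet?, PySem.List.pyIdx?]
  rw [if_neg (by omega), if_pos (by omega : -(p.length:Int) ≤ -1)]
  have : (p.length - (-(-1:Int)).toNat) = p.length - 1 := by norm_num
  rw [this, List.getLast?_eq_getElem?] at *
  simp [h]

lemma pvPrefix_build (xs : List Int) : ∀ (p : List Int) (c : Int), p.getLast? = some c →
    xs.foldl (fun p x => p ++ [PySem.List.pyGetD p (-1) 0 + x]) p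
    = p ++ (List.range xs.length).map (fun j => c + ((xs.take (j+1)).sum)) := by
  induction xs with
  | nil => intro p c h; simp
  | cons x xs ih =>
    intro p c h
    have h2 : (p ++ [c + x]).getLast? = some (c + x) := by simp
    simp only [List.foldl_cons, pyGetD_neg_one p c h, ih _ _ h2,
      List.length_cons, List.range_succ_eq_map, List.map_cons, List.map_map]
    simp [Function.comp_def, add_assoc]

lemma pvPrefix_eq (arr : List Int) :
    pvPrefix arr = (List.range (arr.length + 1)).map (fun j => pvS arr j) := by
  rw [pvPrefix, pvPrefix_build arr [0] 0 (by simp), List.range_succ_eq_map]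
  simp [pvS, Function.comp_def]

-- A's rolling loop computes, at each step, the prefix-sum difference of the current window
lemma loopA (arr : List Int) (kn : Nat) (target : Int) :
    ∀ (d s : Nat) (c : Int), s + kn + d = arr.length →
    (PySem.List.pyRange ((s + kn : Nat) : Int) ((arr.length : Nat) : Int)).foldl
      (fun (st : Int × Int) i =>
        let ws := st.1 - PySem.List.pyGetD arr (i - (kn : Int)) 0 + PySem.List.pyGetD arr i 0
        (ws, if ws ≥ target then st.2 + 1 else st.2))
      (pvS arr (s + kn) - pvS arr s, c)
    = (pvS arr (s + d + kn) - pvS arr (s + d),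
       c + ((List.range d).countP (fun j => pvWin arr kn target (s + 1 + j)) : Int)) := by
  intro d
  induction d with
  | zero =>
    intro s c h
    rw [show PySem.List.pyRange ((s + kn : Nat) : Int) ((arr.length : Nat) : Int) = [] by
      simp [PySem.List.pyRange]; omega]
    simp
  | succ d ih =>
    intro s c h
    have hlt : ((s + kn : Nat) : Int) < ((arr.length : Nat) : Int) := by push_cast; omega
    rw [PySem.List.pyRange_one_cons hlt, List.foldl_cons]
    have e1 : ((s + kn : Nat) : Int) - (kn : Int) = ((s : Nat) : Int) := by push_cast; omega
    have e2 : ((s + kn : Nat) : Int) + 1 = (((s+1) + kn : Nat) : Int) := by push_cast; omega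
    simp only [e1, PySem.List.pyGetD_natCast]
    have hs : s < arr.length := by omega
    have hsk : s + kn < arr.length := by omega
    have hws : pvS arr (s + kn) - pvS arr s - arr.getD s 0 + arr.getD (s + kn) 0
        = pvS arr ((s+1) + kn) - pvS arr (s+1) := by
      have h1 := pvS_succ arr s hs
      have h2 := pvS_succ arr (s + kn) hsk
      have e3 : (s+1) + kn = (s + kn) + 1 := by omega
      rw [e3, h1, h2]; ring
    rw [show (fun (st : Int × Int) i =>
        let ws := st.1 - PySem.List.pyGetD arr (i - (kn : Int)) 0 + PySem.List.pyGetD arr i 0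
        (ws, if ws ≥ target then st.2 + 1 else st.2)) = (fun st i =>
        (st.1 - PySem.List.pyGetD arr (i - (kn : Int)) 0 + PySem.List.pyGetD arr i 0,
         if st.1 - PySem.List.pyGetD arr (i - (kn : Int)) 0 + PySem.List.pyGetD arr i 0 ≥ target
         then st.2 + 1 else st.2)) from rfl]
    simp only [hws, e2]
    rw [ih (s+1) _ (by omega)]
    rw [Prod.mk.injEq]
    refine ⟨by simp only [show s + 1 + d = s + (d + 1) from by omega], ?_⟩
    rw [List.range_succ_eq_map, List.countP_cons, List.countP_map]
    have hc : List.countP ((fun j => pvWin arr kn target (s + 1 + j)) ∘ Nat.succ) (List.range d)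
        = List.countP (fun j => pvWin arr kn target (s + 1 + 1 + j)) (List.range d) := by
      apply List.countP_congr
      intro x _
      have e : s + 1 + x.succ = s + 1 + 1 + x := by omega
      simp only [Function.comp_apply, e]
    rw [hc]
    by_cases hw : pvS arr (s + 1 + kn) - pvS arr (s + 1) ≥ target
    · rw [if_pos hw, if_pos (by simp [pvWin]; omega)]
      push_cast; ring
    · rw [if_neg hw, if_neg (by simp [pvWin]; omega)]
      push_cast; ring

lemma A_char (arr : List Int) (k threshold : Int) (hk : 0 ≤ k) (hkn : k.toNat ≤ arr.length) :
    num_of_subarrays arr k threshold =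
      ((List.range (arr.length - k.toNat + 1)).countP
        (fun i => pvWin arr k.toNat (k * threshold) i) : Int) := by
  obtain ⟨kn, rfl⟩ : ∃ kn : Nat, k = (kn : Int) := ⟨k.toNat, (Int.toNat_of_nonneg hk).symm⟩
  simp only [Int.toNat_natCast] at hkn ⊢
  unfold num_of_subarrays
  rw [PySem.List.slice_to _ (by positivity : (0:Int) ≤ (kn:Int))]
  simp only [Int.toNat_natCast]
  rw [show PySem.List.pyRange ((kn : Nat) : Int) ((arr.length : Nat) : Int)
      = PySem.List.pyRange (((0 + kn : Nat) : Nat) : Int) ((arr.length : Nat) : Int) by norm_num]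
  simp only [show (List.take kn arr).sum = pvS arr (0 + kn) - pvS arr 0 by simp [pvS]]
  rw [loopA arr kn ((kn : Int) * threshold) (arr.length - kn) 0 _ (by omega)]
  rw [List.range_succ_eq_map, List.countP_cons, List.countP_map]
  have hc : List.countP ((fun i => pvWin arr kn ((kn : Int) * threshold) i) ∘ Nat.succ)
        (List.range (arr.length - kn))
      = List.countP (fun j => pvWin arr kn ((kn : Int) * threshold) (0 + 1 + j))
        (List.range (arr.length - kn)) := by
    apply List.countP_congr
    intro x _
    have e : x.succ = 0 + 1 + x := by omega
    simp only [Function.comp_apply, e]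
  rw [hc]
  by_cases hw : pvS arr (0 + kn) - pvS arr 0 ≥ (kn : Int) * threshold
  · rw [if_pos hw, if_pos (by simp only [pvWin, ge_iff_le, decide_eq_true_eq]; omega)]
    push_cast; ring
  · rw [if_neg hw, if_neg (by simp only [pvWin, ge_iff_le, decide_eq_true_eq]; omega)]
    push_cast; ring

lemma B_char (arr : List Int) (k threshold : Int) (hk : 0 ≤ k) (hkn : k.toNat ≤ arr.length) :
    num_of_subarrays_alt arr k threshold =
      ((List.range (arr.length - k.toNat + 1)).countP
        (fun i => pvWin arr k.toNat (k * threshold) i) : Int) := by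
  obtain ⟨kn, rfl⟩ : ∃ kn : Nat, k = (kn : Int) := ⟨k.toNat, (Int.toNat_of_nonneg hk).symm⟩
  simp only [Int.toNat_natCast] at hkn ⊢
  unfold num_of_subarrays_alt
  rw [show ((arr.length : Int) - (kn : Int) + 1) = ((arr.length - kn + 1 : Nat) : Int) by
    push_cast; omega]
  rw [PySem.List.pyRange_zero_natCast, List.foldl_map]
  rw [PySem.List.foldl_congr_mem _ _
    (fun (c : Int) (i : Nat) => if pvWin arr kn ((kn : Int) * threshold) i = true then c + 1 else c)
    0 ?side]
  · rw [PySem.List.foldl_count_if]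
    simp
  case side =>
    intro acc i hi
    dsimp only
    have hi' : i + kn ≤ arr.length := by
      have := List.mem_range.mp hi; omega
    have e : ((i : Nat) : Int) + (kn : Int) = ((i + kn : Nat) : Int) := by push_cast; ring
    rw [e, PySem.List.pyGetD_natCast, PySem.List.pyGetD_natCast, pvPrefix_eq,
      PySem.List.getD_map_range _ _ _ _ (by omega), PySem.List.getD_map_range _ _ _ _ (by omega)]
    by_cases hw : pvS arr (i + kn) - pvS arr i ≥ (kn : Int) * threshold
    · rw [if_pos hw, if_pos (by simp [pvWin]; omega)]
    · rw [if_neg hw, if_neg (by simp [pvWin]; omega)]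

lemma A_big (arr : List Int) (k threshold : Int) (hk : 0 ≤ k) (hkn : (arr.length : Int) < k) :
    num_of_subarrays arr k threshold = if arr.sum ≥ k * threshold then 1 else 0 := by
  unfold num_of_subarrays
  rw [PySem.List.slice_to _ hk, List.take_of_length_le (by omega : arr.length ≤ k.toNat)]
  rw [show PySem.List.pyRange k ((arr.length : Nat) : Int) = [] by
    simp [PySem.List.pyRange]; omega]
  simp

lemma B_big (arr : List Int) (k threshold : Int) (hkn : (arr.length : Int) < k) :
    num_of_subarrays_alt arr k threshold = 0 := by
  unfold num_of_subarrays_alt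
  rw [show PySem.List.pyRange 0 ((arr.length : Int) - k + 1) = [] by
    simp [PySem.List.pyRange]; omega]
  simp

-- ===== VERDICT (by name: the statement is the Claim_ definition above) =====
theorem num_of_subarrays_spec : Claim_unchanged_num_of_subarrays := by
  intro arr k threshold _ hk hD
  have hk' : (0 : Int) ≤ k := hk
  by_cases hle : k.toNat ≤ arr.length
  · rw [A_char arr k threshold hk' hle, B_char arr k threshold hk' hle]
  · have hbig : (arr.length : Int) < k := by omega
    rw [A_big arr k threshold hk' hbig, B_big arr k threshold hbig]
    rw [if_neg]
    intro hsum
    exact hD ⟨by omega, hbig, hsum⟩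

theorem num_of_subarrays_changed : Claim_changed_num_of_subarrays := by
  unfold Claim_changed_num_of_subarrays; decide

theorem num_of_subarrays_tight : Claim_exact_num_of_subarrays := by
  intro arr k threshold _ hk hD
  obtain ⟨hk0, hbig, hsum⟩ := hD
  rw [A_big arr k threshold hk hbig, B_big arr k threshold hbig, if_pos hsum]
  decide
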